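-- pv_equiv track=rewrite | github.com/SanjoSolutions/blocks | main.py | _determine_bottom_row_of_block_shape_in_column
-- ===== SOURCE A (Python) =====
-- def _determine_bottom_row_of_block_shape_in_column(block_shape, column):
--     block_shape_height = len(block_shape)
--     for row in range(block_shape_height - 1, -1, -1):
--         if block_shape[row][column]:
--             return row
--     raise Exception(
--         'There seems to be no block in the column of the block_shape. ' +
--         'Please check the block_shape data.'
--     )
-- ===== SOURCE B (Python) =====
-- def _determine_bottom_row_of_block_shape_in_column(block_shape, column):
--     bottom = None
--     row = 0
--     for cells in block_shape:
--         if cells[column]: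
--             bottom = row
--         row += 1
--     if bottom is None:
--         raise Exception(
--             'There seems to be no block in the column of the block_shape. ' +
--             'Please check the block_shape data.'
--         )
--     return bottom
-- ===== Notes on version B (the rewrite author's own statement) =====
-- stated objective: alternative
-- what changed: Replaces A's bottom-up index scan with early return by a single forward pass over the rows themselves that maintains a last-filled-row accumulator, returning it at the end.
-- outside the precondition, e.g. on _determine_bottom_row_of_block_shape_in_column([[1], [0, 1]], 1): A returns 1, B raises IndexError; on _determine_bottom_row_of_block_shape_in_column([[0]], 0): A raises Exception, B raises Exception
import Mathlib
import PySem

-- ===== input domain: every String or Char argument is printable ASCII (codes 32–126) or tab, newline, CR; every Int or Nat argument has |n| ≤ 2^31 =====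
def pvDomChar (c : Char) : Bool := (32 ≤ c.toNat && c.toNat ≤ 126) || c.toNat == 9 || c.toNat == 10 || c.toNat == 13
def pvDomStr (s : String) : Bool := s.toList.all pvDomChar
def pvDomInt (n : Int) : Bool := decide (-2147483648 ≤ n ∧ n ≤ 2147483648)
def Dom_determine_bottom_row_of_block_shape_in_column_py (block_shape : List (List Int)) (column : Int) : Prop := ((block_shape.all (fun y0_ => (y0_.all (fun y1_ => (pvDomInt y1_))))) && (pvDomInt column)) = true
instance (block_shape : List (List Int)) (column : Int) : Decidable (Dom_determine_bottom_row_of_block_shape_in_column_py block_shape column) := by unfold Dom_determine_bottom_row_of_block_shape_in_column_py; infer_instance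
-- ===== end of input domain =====

-- B replaces A's bottom-up index scan with early return by one forward pass over the
-- rows themselves that maintains a last-filled-row accumulator; same cost, different
-- traversal direction and decomposition.

-- ===== PORT A =====
-- for row in range(len(block_shape)-1, -1, -1): if block_shape[row][column]: return row
-- else raise Exception (excluded by Pre_)
def determine_bottom_row_of_block_shape_in_column_py (block_shape : List (List Int)) (column : Int) : Int :=
  let block_shape_height : Int := block_shape.length
  match (PySem.List.pyRange (block_shape_height - 1) (-1) (-1)).find?
      (fun row => decide (PySem.List.pyGetD (PySem.List.pyGetD block_shape row []) column 0 ≠ 0)) with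
  | some row => row
  | none => 0   -- Python raises Exception here; Pre_ excludes these inputs

-- ===== PORT B =====
-- bottom = None; row = 0; for cells in block_shape: if cells[column]: bottom = row; row += 1
-- then return bottom, or raise if bottom is None (excluded by Pre_)
def determine_bottom_row_of_block_shape_in_column_py_alt (block_shape : List (List Int)) (column : Int) : Int :=
  let st := block_shape.foldl
    (fun (st : Option Int × Int) cells =>
      ((if PySem.List.pyGetD cells column 0 ≠ 0 then some st.2 else st.1), st.2 + 1))
    (none, 0)
  match st.1 with
  | some bottom => bottom
  | none => 0   -- Python raises Exception here; Pre_ excludes these inputs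

-- ===== PRECONDITION & SPEC =====
-- Pre_ excludes exactly the inputs where a run raises: a column index out of range for some
-- row (IndexError; A returns on some such ragged inputs where the bad row lies above the
-- bottommost filled row, but B's full forward pass raises there), and the no-filled-row
-- case (Exception).
def Pre_determine_bottom_row_of_block_shape_in_column_py (block_shape : List (List Int)) (column : Int) : Prop :=
  (∀ row ∈ block_shape, PySem.Raise.InRange row.length column) ∧
  (∃ row ∈ block_shape, PySem.List.pyGetD row column 0 ≠ 0)
instance (block_shape : List (List Int)) (column : Int) : Decidable (Pre_determine_bottom_row_of_block_shape_in_column_py block_shape column) := by unfold Pre_determine_bottom_row_of_block_shape_in_column_py; infer_instance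

def pvWitness_determine_bottom_row_of_block_shape_in_column_py : List (List Int) × Int := ([[0], [1]], 0)

def Spec_determine_bottom_row_of_block_shape_in_column_py (block_shape : List (List Int)) (column : Int) (out : Int) : Prop := out = determine_bottom_row_of_block_shape_in_column_py_alt block_shape column
instance (block_shape : List (List Int)) (column : Int) (out : Int) : Decidable (Spec_determine_bottom_row_of_block_shape_in_column_py block_shape column out) := by unfold Spec_determine_bottom_row_of_block_shape_in_column_py; infer_instance

-- ===== CLAIM (what is proved, stated in full; the proofs are below) =====
def Claim_equal_determine_bottom_row_of_block_shape_in_column_py : Prop := ∀ (block_shape : List (List Int)) (column : Int), Dom_determine_bottom_row_of_block_shape_in_column_py block_shape column → Pre_determine_bottom_row_of_block_shape_in_column_py block_shape column → Spec_determine_bottom_row_of_block_shape_in_column_py block_shape column (determine_bottom_row_of_block_shape_in_column_py block_shape column)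

-- ===== LEMMAS AND PROOFS =====

-- specification value: index of the LAST row of bs whose `column` entry is nonzero
def lastFilled (bs : List (List Int)) (column : Int) : Option Int :=
  match bs with
  | [] => none
  | c :: t =>
    match lastFilled t column with
    | some k => some (k + 1)
    | none => if PySem.List.pyGetD c column 0 ≠ 0 then some 0 else none

theorem lastFilled_concat (t : List (List Int)) (c : List Int) (column : Int) :
    lastFilled (t ++ [c]) column =
      if PySem.List.pyGetD c column 0 ≠ 0 then some (t.length : Int)
      else lastFilled t column := by
  induction t with
  | nil => simp [lastFilled]
  | cons h t ih =>
    simp only [List.cons_append, lastFilled, ih, List.length_cons]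
    cases hlf : lastFilled t column <;> split_ifs <;> simp

theorem find?_congr_mem {α : Type} (l : List α) (p q : α → Bool)
    (h : ∀ x ∈ l, p x = q x) : l.find? p = l.find? q := by
  induction l with
  | nil => rfl
  | cons x t ih =>
    rw [List.find?_cons, List.find?_cons, h x (by simp)]
    cases q x
    · exact ih (fun y hy => h y (by simp [hy]))
    · rfl

-- A's reverse index scan computes lastFilled
theorem A_scan_eq_lastFilled (bs : List (List Int)) (column : Int) :
    (PySem.List.pyRange ((bs.length : Int) - 1) (-1) (-1)).find?
      (fun row => decide (PySem.List.pyGetD (PySem.List.pyGetD bs row []) column 0 ≠ 0))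
      = lastFilled bs column := by
  induction bs using List.reverseRecOn with
  | nil => simp [PySem.List.pyRange_neg_one_eq_nil, lastFilled]
  | append_singleton t c ih =>
    have hlen : ((t ++ [c]).length : Int) - 1 = (t.length : Int) := by simp
    rw [hlen, PySem.List.pyRange_neg_one_cons (by omega), List.find?_cons]
    have hc : PySem.List.pyGetD (t ++ [c]) (t.length : Int) [] = c := by
      rw [PySem.List.pyGetD_natCast]
      simp [List.getD]
    rw [lastFilled_concat, hc]
    by_cases hq : PySem.List.pyGetD c column 0 ≠ 0
    · simp [hq]
    · simp only [hq, decide_false]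
      rw [find?_congr_mem _ _
        (fun row => decide (PySem.List.pyGetD (PySem.List.pyGetD t row []) column 0 ≠ 0))
        ?_]
      · exact ih
      · intro x hx
        rcases (PySem.List.mem_pyRange_neg_one.mp hx) with ⟨h1, h2⟩
        have hx0 : 0 ≤ x := by omega
        have hxl : x < (t.length : Int) := by omega
        congr 2
        have hxl' : x < ((t ++ [c]).length : Int) := by push_cast [List.length_append]; omega
        rw [PySem.List.pyGetD_eq_getElem (t ++ [c]) [] hx0 hxl',
            PySem.List.pyGetD_eq_getElem t [] hx0 hxl]
        have hnat : x.toNat < t.length := by omega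
        exact congrArg (fun l => PySem.List.pyGetD l column 0) (List.getElem_append_left (bs := [c]) hnat)

-- B's forward accumulator fold computes lastFilled (shifted by the running row counter)
theorem B_fold_eq_lastFilled (column : Int) (bs : List (List Int)) :
    ∀ (acc : Option Int) (r : Int),
      (bs.foldl (fun (st : Option Int × Int) cells =>
          ((if PySem.List.pyGetD cells column 0 ≠ 0 then some st.2 else st.1), st.2 + 1))
        (acc, r)).1
      = match lastFilled bs column with
        | some k => some (r + k)
        | none => acc := by
  induction bs with
  | nil => intro acc r; rfl
  | cons c t ih =>
    intro acc r
    rw [List.foldl_cons, ih]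
    simp only [lastFilled]
    cases h : lastFilled t column with
    | some k => simp only; congr 1; ring
    | none => split_ifs <;> simp

-- ===== VERDICT (by name: the statement is the Claim_ definition above) =====
theorem determine_bottom_row_of_block_shape_in_column_py_spec : Claim_equal_determine_bottom_row_of_block_shape_in_column_py := by
  intro bs col _ _
  unfold Spec_determine_bottom_row_of_block_shape_in_column_py
  unfold determine_bottom_row_of_block_shape_in_column_py determine_bottom_row_of_block_shape_in_column_py_alt
  dsimp only
  rw [A_scan_eq_lastFilled, B_fold_eq_lastFilled]
  cases lastFilled bs col <;> simp
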